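-- pv_equiv track=rewrite | github.com/avnerdorman/avnerdorman | pattern.py | numToOnsets
-- ===== SOURCE A (Python) =====
-- def numToOnsets(lst):
--     onsets = sum(lst)
--     res = []
--     counter = 0
--     for i in lst:
--         res.append(counter)
--         counter += i
--     return res
-- ===== SOURCE B (Python) =====
-- def numToOnsets(lst):
--     return [sum(lst[:i]) for i in range(len(lst))]
-- ===== Notes on version B (the rewrite author's own statement) =====
-- stated objective: simpler
-- what changed: Replaces A's single accumulating pass with a running counter by the direct definitional form: a one-line comprehension re-summing each prefix slice.
import Mathlib
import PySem

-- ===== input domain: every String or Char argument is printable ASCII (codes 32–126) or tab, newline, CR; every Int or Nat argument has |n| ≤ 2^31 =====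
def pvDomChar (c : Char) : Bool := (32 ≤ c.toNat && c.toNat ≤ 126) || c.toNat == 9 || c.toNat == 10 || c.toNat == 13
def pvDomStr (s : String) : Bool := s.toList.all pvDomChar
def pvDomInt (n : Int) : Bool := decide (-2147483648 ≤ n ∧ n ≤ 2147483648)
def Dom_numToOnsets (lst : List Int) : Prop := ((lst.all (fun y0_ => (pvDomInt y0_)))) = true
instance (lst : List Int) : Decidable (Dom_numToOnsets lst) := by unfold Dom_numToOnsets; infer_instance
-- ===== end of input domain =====

-- B replaces A's accumulating running-counter loop with the definitional form: each output element is the sum of the prefix before it.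

-- ===== PORT A =====
-- fold over lst carrying (res, counter), exactly A's loop
def numToOnsets (lst : List Int) : List Int :=
  (lst.foldl (fun (st : List Int × Int) i => (st.1 ++ [st.2], st.2 + i)) ([], 0)).1

-- ===== PORT B =====
def numToOnsets_alt (lst : List Int) : List Int :=
  (PySem.List.pyRange 0 lst.length 1).map (fun i => (PySem.List.slice lst none (some i)).sum)

-- ===== PRECONDITION & SPEC =====
def Spec_numToOnsets (lst : List Int) (out : List Int) : Prop := out = numToOnsets_alt lst
instance (lst : List Int) (out : List Int) : Decidable (Spec_numToOnsets lst out) := by unfold Spec_numToOnsets; infer_instance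

-- ===== CLAIM (what is proved, stated in full; the proofs are below) =====
def Claim_equal_numToOnsets : Prop := ∀ (lst : List Int), Dom_numToOnsets lst → Spec_numToOnsets lst (numToOnsets lst)

-- ===== LEMMAS AND PROOFS =====
theorem numToOnsets_foldl_inv (lst : List Int) (res : List Int) (c : Int) :
    (lst.foldl (fun (st : List Int × Int) i => (st.1 ++ [st.2], st.2 + i)) (res, c)).1
      = res ++ (List.range lst.length).map (fun i => c + (lst.take i).sum) := by
  induction lst generalizing res c with
  | nil => simp
  | cons x xs ih =>
    simp only [List.foldl_cons, List.length_cons, List.range_succ_eq_map, List.map_cons, ih]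
    simp [List.append_assoc, List.map_map, Function.comp, add_assoc]

theorem slice_prefix (lst : List Int) (i : Nat) :
    PySem.List.slice lst none (some (i : Int)) = lst.take i := by
  simp [PySem.List.slice_to]

-- ===== VERDICT (by name: the statement is the Claim_ definition above) =====
theorem numToOnsets_spec : Claim_equal_numToOnsets := by
  intro lst _
  show _ = _
  rw [numToOnsets, numToOnsets_foldl_inv lst [] 0]
  rw [numToOnsets_alt]
  have hr : PySem.List.pyRange 0 lst.length 1 = (List.range lst.length).map (Int.ofNat) := by
    simp only [PySem.List.pyRange]
    rcases Nat.eq_zero_or_pos lst.length with h | h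
    · simp [h]
    · simp [h]
  rw [hr, List.map_map]
  simp only [List.nil_append]
  apply List.map_congr_left
  intro i hi
  simp only [List.mem_range] at hi
  simp [Function.comp, slice_prefix lst i]
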